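-- pv_equiv track=rewrite | github.com/chchaeun/study-algorithm | 기출/카카오/2023-winter-5.py | solution
-- ===== SOURCE A (Python) =====
-- def solution(n, tops):
--     DIVISOR = 10007
--     memo = [0 for _ in range(2 * n + 1)]
--
--     memo[0] = 1
--     memo[1] = 3 if tops[0] == 1 else 2
--
--     for i in range(2, 2 * n + 1):
--         if i % 2 == 1:
--             if tops[i//2] == 1:
--                 memo[i] = (memo[i - 1] * 2 + memo[i - 2]) % DIVISOR
--             else:
--                 memo[i] = (memo[i - 1] + memo[i - 2]) % DIVISOR
--         else:
--             memo[i] = (memo[i - 1] + memo[i - 2]) % DIVISOR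
--
--     return memo[2 * n]
-- ===== SOURCE B (Python) =====
-- def solution(n, tops):
--     # Transfer-matrix formulation: each column k >= 1 contributes a fixed 2x2
--     # matrix; the answer is the accumulated matrix product applied to the seed
--     # vector, summed mod 10007.
--     MOD = 10007
--
--     def mat(t):
--         c = 2 if t == 1 else 1
--         return ((1, 1), (c, c + 1))
--
--     def mul(X, Y):
--         return tuple(
--             tuple(sum(X[i][k] * Y[k][j] for k in range(2)) % MOD for j in range(2))
--             for i in range(2)
--         )
--
--     M = ((1, 0), (0, 1))
--     for k in range(1, n):
--         M = mul(mat(tops[k]), M)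
--
--     a, b = 1, (3 if tops[0] == 1 else 2)
--     e = M[0][0] * a + M[0][1] * b
--     f = M[1][0] * a + M[1][1] * b
--     return (e + f) % MOD
-- ===== Notes on version B (the rewrite author's own statement) =====
-- stated objective: alternative
-- what changed: Reformulates the DP as a transfer-matrix product: each column contributes a 2x2 matrix, B folds the matrix product mod 10007 independently of the seed, then applies the accumulated matrix to the seed vector at the end, instead of A's 2n+1-cell parity-branched memo array.
import Mathlib
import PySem

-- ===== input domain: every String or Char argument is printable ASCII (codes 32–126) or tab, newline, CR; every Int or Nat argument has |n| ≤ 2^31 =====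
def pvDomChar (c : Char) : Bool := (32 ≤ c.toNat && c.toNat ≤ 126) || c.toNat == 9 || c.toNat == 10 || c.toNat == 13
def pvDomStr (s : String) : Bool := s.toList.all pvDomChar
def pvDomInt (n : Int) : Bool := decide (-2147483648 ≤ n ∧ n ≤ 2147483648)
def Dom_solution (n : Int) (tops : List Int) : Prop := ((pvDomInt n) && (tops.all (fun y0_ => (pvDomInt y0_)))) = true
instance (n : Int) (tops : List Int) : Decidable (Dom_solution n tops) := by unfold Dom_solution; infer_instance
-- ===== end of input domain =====

-- B replaces A's (2n+1)-cell parity-branched memo array by a transfer-matrix product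
-- (one 2x2 matrix per column, applied to the seed vector at the end); return values proved equal on Pre_.

-- ===== PORT A =====
def stepA (tops : List Int) (memo : List Int) (i : Int) : List Int :=
  if PySem.Int.mod i 2 == 1 then
    if PySem.List.pyGetD tops (PySem.Int.floordiv i 2) 0 == 1 then
      PySem.List.pySetD memo i
        (PySem.Int.mod (PySem.List.pyGetD memo (i - 1) 0 * 2 + PySem.List.pyGetD memo (i - 2) 0) 10007)
    else
      PySem.List.pySetD memo i
        (PySem.Int.mod (PySem.List.pyGetD memo (i - 1) 0 + PySem.List.pyGetD memo (i - 2) 0) 10007)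
  else
    PySem.List.pySetD memo i
      (PySem.Int.mod (PySem.List.pyGetD memo (i - 1) 0 + PySem.List.pyGetD memo (i - 2) 0) 10007)

def solution (n : Int) (tops : List Int) : Int :=
  let memo0 := List.replicate (2 * n + 1).toNat (0 : Int)
  let memo1 := PySem.List.pySetD memo0 0 1
  let memo2 := PySem.List.pySetD memo1 1 (if PySem.List.pyGetD tops 0 0 == 1 then 3 else 2)
  let memo3 := (PySem.List.pyRange 2 (2 * n + 1) 1).foldl (stepA tops) memo2
  PySem.List.pyGetD memo3 (2 * n) 0

-- ===== PORT B =====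
-- B's column matrix mat(t) = ((1,1),(c,c+1)), flattened as (m00, m01, m10, m11)
def matB (t : Int) : Int × Int × Int × Int :=
  let c : Int := if t == 1 then 2 else 1
  (1, 1, c, c + 1)

-- B's 2x2 matrix product, every entry reduced mod 10007 (Source B's mul)
def mulB (X Y : Int × Int × Int × Int) : Int × Int × Int × Int :=
  (PySem.Int.mod (X.1 * Y.1 + X.2.1 * Y.2.2.1) 10007,
   PySem.Int.mod (X.1 * Y.2.1 + X.2.1 * Y.2.2.2) 10007,
   PySem.Int.mod (X.2.2.1 * Y.1 + X.2.2.2 * Y.2.2.1) 10007,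
   PySem.Int.mod (X.2.2.1 * Y.2.1 + X.2.2.2 * Y.2.2.2) 10007)

def stepM (tops : List Int) (M : Int × Int × Int × Int) (k : Int) : Int × Int × Int × Int :=
  mulB (matB (PySem.List.pyGetD tops k 0)) M

def solution_alt (n : Int) (tops : List Int) : Int :=
  let M := (PySem.List.pyRange 1 n 1).foldl (stepM tops) (1, 0, 0, 1)
  let b : Int := if PySem.List.pyGetD tops 0 0 == 1 then 3 else 2
  let e := M.1 * 1 + M.2.1 * b
  let f := M.2.2.1 * 1 + M.2.2.2 * b
  PySem.Int.mod (e + f) 10007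

-- ===== PRECONDITION & SPEC =====
-- Pre_ is exactly where Python A returns: n ≥ 1 (memo[1] exists) and len(tops) ≥ n (tops[k], k < n).
def Pre_solution (n : Int) (tops : List Int) : Prop := 1 ≤ n ∧ n ≤ (tops.length : Int)
instance (n : Int) (tops : List Int) : Decidable (Pre_solution n tops) := by unfold Pre_solution; infer_instance
def pvWitness_solution : Int × List Int := (3, [1, 0, 1])

def Spec_solution (n : Int) (tops : List Int) (out : Int) : Prop := out = solution_alt n tops
instance (n : Int) (tops : List Int) (out : Int) : Decidable (Spec_solution n tops out) := by unfold Spec_solution; infer_instance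

-- ===== CLAIM (what is proved, stated in full; the proofs are below) =====
def Claim_equal_solution : Prop := ∀ (n : Int) (tops : List Int), Dom_solution n tops → Pre_solution n tops → Spec_solution n tops (solution n tops)

-- ===== LEMMAS AND PROOFS =====
def f0 (tops : List Int) : Int := if PySem.List.pyGetD tops 0 0 == 1 then 3 else 2

-- proof-side rolling pair (memo[2k], memo[2k+1]) used to characterise A's array
def stepB (tops : List Int) (p : Int × Int) (k : Int) : Int × Int :=
  let e := PySem.Int.mod (p.1 + p.2) 10007
  let f := PySem.Int.mod ((if PySem.List.pyGetD tops k 0 == 1 then 2 else 1) * e + p.2) 10007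
  (e, f)

def Bf (tops : List Int) (k : Nat) : Int × Int :=
  (PySem.List.pyRange 1 ((k : Int) + 1) 1).foldl (stepB tops) (1, f0 tops)

def Mf (tops : List Int) (k : Nat) : Int × Int × Int × Int :=
  (PySem.List.pyRange 1 ((k : Int) + 1) 1).foldl (stepM tops) (1, 0, 0, 1)

lemma pyGetD_append_nat (pre rest : List Int) (t : Nat) (d : Int) :
    PySem.List.pyGetD (pre ++ rest) ((pre.length : Int) + (t : Int)) d = rest.getD t d := by
  have : ((pre.length : Int) + (t : Int)) = ((pre.length + t : Nat) : Int) := by push_cast; ring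
  rw [this, PySem.List.pyGetD_natCast]
  unfold List.getD
  rw [List.getElem?_append_right (by omega)]
  simp

lemma set_append_nat (pre rest : List Int) (t : Nat) (v : Int) :
    (pre ++ rest).set (pre.length + t) v = pre ++ rest.set t v := by
  simp

lemma memoInit_eq (tops : List Int) (N : Nat) (h : 1 ≤ N) :
    PySem.List.pySetD (PySem.List.pySetD (List.replicate (2 * N + 1) (0 : Int)) 0 1) 1 (f0 tops)
      = 1 :: f0 tops :: List.replicate (2 * N - 1) 0 := by
  obtain ⟨M, rfl⟩ : ∃ M, N = M + 1 := ⟨N - 1, by omega⟩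
  have h1 : 2 * (M + 1) + 1 = (2 * M + 1) + 1 + 1 := by omega
  have h2 : 2 * (M + 1) - 1 = 2 * M + 1 := by omega
  rw [h1, h2]
  simp [pysem, List.replicate_succ]

lemma stepA_even (tops pre : List Int) (e f : Int) (j k : Nat) (hpre : pre.length = 2 * k) :
    stepA tops (pre ++ e :: f :: List.replicate (j + 1) (0 : Int)) (2 * (k : Int) + 2)
      = pre ++ e :: f :: ((f + e) % 10007) :: List.replicate j 0 := by
  have hL : (pre.length : Int) = 2 * (k : Int) := by exact_mod_cast hpre
  have hmod0 : PySem.Int.mod (2 * (k : Int) + 2) 2 = 0 := by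
    rw [PySem.Int.mod_eq_emod_of_pos (by norm_num)]; omega
  have h1 : (2 * (k : Int) + 2) - 1 = (pre.length : Int) + ((1 : Nat) : Int) := by rw [hL]; push_cast; ring
  have g2 : PySem.List.pyGetD (pre ++ e :: f :: List.replicate (j + 1) (0 : Int)) (2 * (k : Int)) 0 = e := by
    have h : (2 * (k : Int)) = (pre.length : Int) + ((0 : Nat) : Int) := by rw [hL]; push_cast; ring
    rw [h, pyGetD_append_nat]
    simp [List.getD]
  have hnn : (0 : Int) ≤ 2 * (k : Int) + 2 := by positivity
  have ht : (2 * (k : Int) + 2).toNat = pre.length + 2 := by omega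
  rw [stepA, hmod0]
  norm_num
  rw [h1, pyGetD_append_nat, g2, PySem.List.pySetD_of_nonneg _ _ hnn, ht, set_append_nat]
  simp [List.getD, List.replicate_succ]

lemma two_step (tops pre : List Int) (e f : Int) (j k : Nat) (hpre : pre.length = 2 * k) :
    stepA tops (stepA tops (pre ++ e :: f :: List.replicate (j + 2) (0 : Int)) (2 * (k : Int) + 2)) (2 * (k : Int) + 3)
      = pre ++ e :: f :: (stepB tops (e, f) ((k : Int) + 1)).1 :: (stepB tops (e, f) ((k : Int) + 1)).2 :: List.replicate j 0 := by
  have hL : (pre.length : Int) = 2 * (k : Int) := by exact_mod_cast hpre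
  have hmod1 : PySem.Int.mod (2 * (k : Int) + 3) 2 = 1 := by
    rw [PySem.Int.mod_eq_emod_of_pos (by norm_num)]; omega
  have hdiv : PySem.Int.floordiv (2 * (k : Int) + 3) 2 = (k : Int) + 1 := by
    rw [PySem.Int.floordiv_eq_ediv_of_pos (by norm_num)]; omega
  rw [show (j + 2) = (j + 1) + 1 from rfl, stepA_even tops pre e f (j + 1) k hpre]
  have h1' : (2 * (k : Int) + 3) - 1 = (pre.length : Int) + ((2 : Nat) : Int) := by rw [hL]; push_cast; ring
  have h2' : (2 * (k : Int) + 3) - 2 = (pre.length : Int) + ((1 : Nat) : Int) := by rw [hL]; push_cast; ring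
  have ht : (2 * (k : Int) + 3).toNat = pre.length + 3 := by omega
  have hnn : (0 : Int) ≤ 2 * (k : Int) + 3 := by positivity
  rw [stepA, hmod1, hdiv]
  simp only [h1', h2', pyGetD_append_nat]
  rw [stepB]
  by_cases hc : PySem.List.pyGetD tops ((k : Int) + 1) 0 == 1 <;>
    simp only [hc, if_true, if_false, Bool.false_eq_true] <;>
    rw [PySem.List.pySetD_of_nonneg _ _ hnn, ht, set_append_nat] <;>
    simp [List.getD, List.replicate_succ] <;>
    ring_nf <;>
    exact ⟨trivial, trivial⟩

lemma Bf_succ (tops : List Int) (k : Nat) :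
    Bf tops (k + 1) = stepB tops (Bf tops k) ((k : Int) + 1) := by
  unfold Bf
  have h : ((k + 1 : Nat) : Int) + 1 = ((k : Int) + 1) + 1 := by push_cast; ring
  rw [h, PySem.List.pyRange_one_succ_right (by omega), List.foldl_append]
  simp [List.foldl]

lemma Bf_zero (tops : List Int) : Bf tops 0 = (1, f0 tops) := by
  unfold Bf
  rw [show ((0 : Nat) : Int) + 1 = 1 from by norm_num, PySem.List.pyRange_one_eq_nil (by norm_num)]
  rfl

lemma Mf_succ (tops : List Int) (k : Nat) :
    Mf tops (k + 1) = stepM tops (Mf tops k) ((k : Int) + 1) := by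
  unfold Mf
  have h : ((k + 1 : Nat) : Int) + 1 = ((k : Int) + 1) + 1 := by push_cast; ring
  rw [h, PySem.List.pyRange_one_succ_right (by omega), List.foldl_append]
  simp [List.foldl]

lemma Mf_zero (tops : List Int) : Mf tops 0 = (1, 0, 0, 1) := by
  unfold Mf
  rw [show ((0 : Nat) : Int) + 1 = 1 from by norm_num, PySem.List.pyRange_one_eq_nil (by norm_num)]
  rfl

lemma emod_self_modeq (a : Int) : a % 10007 ≡ a [ZMOD 10007] :=
  Int.emod_emod_of_dvd a dvd_rfl

-- the matrix fold applied to the seed vector is congruent (mod 10007) to the rolling pair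
lemma mat_pair (tops : List Int) (k : Nat) :
    ((Mf tops k).1 * 1 + (Mf tops k).2.1 * f0 tops ≡ (Bf tops k).1 [ZMOD 10007]) ∧
    ((Mf tops k).2.2.1 * 1 + (Mf tops k).2.2.2 * f0 tops ≡ (Bf tops k).2 [ZMOD 10007]) := by
  induction k with
  | zero =>
    rw [Mf_zero, Bf_zero]
    constructor <;> simp [Int.ModEq.refl]
  | succ k ih =>
    obtain ⟨ihe, ihf⟩ := ih
    rw [Mf_succ, Bf_succ, stepM, stepB, matB, mulB]
    set M := Mf tops k
    set P := Bf tops k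
    set c : Int := if PySem.List.pyGetD tops ((k : Int) + 1) 0 == 1 then 2 else 1 with hc
    have hm : ∀ a : Int, PySem.Int.mod a 10007 = a % 10007 := fun a =>
      PySem.Int.mod_eq_emod_of_pos (by norm_num)
    simp only [hm, one_mul]
    have he : (M.1 + M.2.2.1) % 10007 * 1 + (M.2.1 + M.2.2.2) % 10007 * f0 tops
        ≡ (P.1 + P.2) % 10007 [ZMOD 10007] := by
      calc (M.1 + M.2.2.1) % 10007 * 1 + (M.2.1 + M.2.2.2) % 10007 * f0 tops
          ≡ (M.1 + M.2.2.1) * 1 + (M.2.1 + M.2.2.2) * f0 tops [ZMOD 10007] :=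
            Int.ModEq.add ((emod_self_modeq _).mul_right 1) ((emod_self_modeq _).mul_right _)
        _ = (M.1 * 1 + M.2.1 * f0 tops) + (M.2.2.1 * 1 + M.2.2.2 * f0 tops) := by ring
        _ ≡ P.1 + P.2 [ZMOD 10007] := ihe.add ihf
        _ ≡ (P.1 + P.2) % 10007 [ZMOD 10007] := (emod_self_modeq _).symm
    have hf : (c * M.1 + (c + 1) * M.2.2.1) % 10007 * 1 + (c * M.2.1 + (c + 1) * M.2.2.2) % 10007 * f0 tops
        ≡ (c * ((P.1 + P.2) % 10007) + P.2) % 10007 [ZMOD 10007] := by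
      calc (c * M.1 + (c + 1) * M.2.2.1) % 10007 * 1 + (c * M.2.1 + (c + 1) * M.2.2.2) % 10007 * f0 tops
          ≡ (c * M.1 + (c + 1) * M.2.2.1) * 1 + (c * M.2.1 + (c + 1) * M.2.2.2) * f0 tops [ZMOD 10007] :=
            Int.ModEq.add ((emod_self_modeq _).mul_right 1) ((emod_self_modeq _).mul_right _)
        _ = c * (M.1 * 1 + M.2.1 * f0 tops) + ((c + 1) * (M.2.2.1 * 1 + M.2.2.2 * f0 tops)) := by ring
        _ ≡ c * P.1 + (c + 1) * P.2 [ZMOD 10007] := (ihe.mul_left c).add (ihf.mul_left _)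
        _ = c * (P.1 + P.2) + P.2 := by ring
        _ ≡ c * ((P.1 + P.2) % 10007) + P.2 [ZMOD 10007] :=
            Int.ModEq.add ((emod_self_modeq _).symm.mul_left c) (Int.ModEq.refl _)
        _ ≡ (c * ((P.1 + P.2) % 10007) + P.2) % 10007 [ZMOD 10007] := (emod_self_modeq _).symm
    exact ⟨he, hf⟩

lemma inv (tops : List Int) (N : Nat) (hN : 1 ≤ N) (k : Nat) (hk : k < N) :
    ∃ pre : List Int, pre.length = 2 * k ∧
      (PySem.List.pyRange 2 (2 * (k : Int) + 2) 1).foldl (stepA tops)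
          (PySem.List.pySetD (PySem.List.pySetD (List.replicate (2 * N + 1) (0 : Int)) 0 1) 1 (f0 tops))
        = pre ++ (Bf tops k).1 :: (Bf tops k).2 :: List.replicate (2 * N - 2 * k - 1) 0 := by
  induction k with
  | zero =>
    refine ⟨[], rfl, ?_⟩
    rw [show (2 * ((0 : Nat) : Int) + 2) = 2 from by norm_num,
        PySem.List.pyRange_one_eq_nil (by norm_num), memoInit_eq tops N hN, Bf_zero]
    simp
  | succ k ih =>
    obtain ⟨pre, hlen, heq⟩ := ih (by omega)
    refine ⟨pre ++ [(Bf tops k).1, (Bf tops k).2], by simp [hlen]; omega, ?_⟩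
    have hsplit : PySem.List.pyRange 2 (2 * ((k + 1 : Nat) : Int) + 2) 1
        = PySem.List.pyRange 2 (2 * (k : Int) + 2) 1 ++ [2 * (k : Int) + 2, 2 * (k : Int) + 3] := by
      rw [show (2 * ((k + 1 : Nat) : Int) + 2) = (2 * (k : Int) + 3) + 1 from by push_cast; ring,
          PySem.List.pyRange_one_succ_right (by omega),
          show (2 * (k : Int) + 3) = (2 * (k : Int) + 2) + 1 from by ring,
          PySem.List.pyRange_one_succ_right (by omega)]
      simp
    rw [hsplit, List.foldl_append, heq]
    have hrep : 2 * N - 2 * k - 1 = (2 * N - 2 * (k + 1) - 1) + 2 := by omega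
    rw [hrep]
    show stepA tops (stepA tops _ _) _ = _
    rw [two_step tops pre (Bf tops k).1 (Bf tops k).2 (2 * N - 2 * (k + 1) - 1) k hlen,
        Bf_succ tops k]
    simp

-- ===== VERDICT (by name: the statement is the Claim_ definition above) =====
theorem solution_spec : Claim_equal_solution := by
  intro n tops _hdom hpre
  obtain ⟨h1n, h2n⟩ := hpre
  obtain ⟨N, hN1, hn⟩ : ∃ N : Nat, 1 ≤ N ∧ n = (N : Int) := ⟨n.toNat, by omega, by omega⟩
  subst hn
  obtain ⟨pre, hlen, heq⟩ := inv tops N hN1 (N - 1) (by omega)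
  simp only [f0] at heq
  have hrange : PySem.List.pyRange 2 (2 * (N : Int) + 1) 1
      = PySem.List.pyRange 2 (2 * ((N - 1 : Nat) : Int) + 2) 1 ++ [2 * ((N - 1 : Nat) : Int) + 2] := by
    rw [show (2 * (N : Int) + 1) = (2 * ((N - 1 : Nat) : Int) + 2) + 1 from by omega,
        PySem.List.pyRange_one_succ_right (by omega)]
  have hcount : (2 * (N : Int) + 1).toNat = 2 * N + 1 := by omega
  simp only [Spec_solution, solution, solution_alt]
  rw [hcount, hrange, List.foldl_append, heq, List.foldl_cons, List.foldl_nil]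
  have hone : 2 * N - 2 * (N - 1) - 1 = 0 + 1 := by omega
  rw [hone, stepA_even tops pre (Bf tops (N - 1)).1 (Bf tops (N - 1)).2 0 (N - 1) hlen]
  have hidx : (2 * (N : Int)) = (pre.length : Int) + ((2 : Nat) : Int) := by
    have h' : (pre.length : Int) = 2 * ((N - 1 : Nat) : Int) := by exact_mod_cast hlen
    rw [h']; push_cast; omega
  rw [hidx, pyGetD_append_nat]
  have hMn : (PySem.List.pyRange 1 (N : Int) 1).foldl (stepM tops) (1, 0, 0, 1) = Mf tops (N - 1) := by
    unfold Mf
    rw [show ((N - 1 : Nat) : Int) + 1 = (N : Int) from by omega]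
  rw [hMn]
  obtain ⟨he, hf⟩ := mat_pair tops (N - 1)
  have hm : ∀ a : Int, PySem.Int.mod a 10007 = a % 10007 := fun a =>
    PySem.Int.mod_eq_emod_of_pos (by norm_num)
  rw [hm]
  have hcong : (Bf tops (N - 1)).2 + (Bf tops (N - 1)).1
      ≡ (Mf tops (N - 1)).1 * 1 + (Mf tops (N - 1)).2.1 * f0 tops
        + ((Mf tops (N - 1)).2.2.1 * 1 + (Mf tops (N - 1)).2.2.2 * f0 tops) [ZMOD 10007] := by
    have := (he.add hf).symm
    calc (Bf tops (N - 1)).2 + (Bf tops (N - 1)).1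
        = (Bf tops (N - 1)).1 + (Bf tops (N - 1)).2 := by ring
      _ ≡ _ [ZMOD 10007] := this
  simp only [List.getD]
  simp only [f0] at hcong
  exact hcong
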